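-- pv_equiv track=rewrite | github.com/sukram-n/personal-accompanist | personal_accompanist/lilypond.py | add_slurs
-- ===== SOURCE A (Python) =====
-- def add_slurs(v_text, tempo):
--     slur_is_open = False
--     for i, t in enumerate(v_text[:-1]):
--
--         if i % tempo == 0 and i < len(v_text) - 1 and not slur_is_open:
--             v_text[i] += "\\("
--             slur_is_open = True
--         if slur_is_open and (i % tempo == tempo - 1 or v_text[i + 1].startswith("r")):
--             v_text[i] += "\\)"
--             slur_is_open = False
--     if slur_is_open:
--         v_text.append('}')
--     return v_text
-- ===== SOURCE B (Python) =====
-- def add_slurs(v_text, tempo):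
--     # Two-phase: first plan the slurs as (open_index, close_index) pairs by
--     # scanning the untouched list, then apply all markers in a second pass.
--     n = len(v_text)
--     pairs = []
--     o = 0
--     while o is not None and o < n - 1:
--         c = next((i for i in range(o, n - 1)
--                   if i % tempo == tempo - 1 or v_text[i + 1].startswith('r')),
--                  None)
--         pairs.append((o, c))
--         if c is None:
--             break
--         o = next((i for i in range(c + 1, n - 1) if i % tempo == 0), None)
--     for o, c in pairs:
--         v_text[o] += '\\('
--         if c is not None:
--             v_text[c] += '\\)'
--     if pairs and pairs[-1][1] is None:
--         v_text.append('}')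
--     return v_text
-- ===== Notes on version B (the rewrite author's own statement) =====
-- stated objective: alternative
-- what changed: B replaces A's single stateful scan (a slur_is_open flag toggled per index, mutating as it goes) by a two-phase plan: first compute the list of (open_index, close_index) pairs by scanning the untouched list (finding each close and then the next opening multiple), then apply all markers in a second pass; Pre_ excludes only tempo == 0 with two or more notes, where A raises ZeroDivisionError (B raises it too).
import Mathlib
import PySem

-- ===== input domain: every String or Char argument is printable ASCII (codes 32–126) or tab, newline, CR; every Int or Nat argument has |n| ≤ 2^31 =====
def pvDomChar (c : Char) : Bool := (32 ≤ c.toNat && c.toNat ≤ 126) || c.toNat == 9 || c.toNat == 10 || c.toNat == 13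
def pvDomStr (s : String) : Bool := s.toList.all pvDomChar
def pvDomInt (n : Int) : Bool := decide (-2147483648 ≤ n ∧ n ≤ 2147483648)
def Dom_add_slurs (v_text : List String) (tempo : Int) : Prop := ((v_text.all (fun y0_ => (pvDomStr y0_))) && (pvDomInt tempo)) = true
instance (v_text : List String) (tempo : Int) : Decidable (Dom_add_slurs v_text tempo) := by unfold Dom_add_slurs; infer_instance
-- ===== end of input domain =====

-- B plans the slurs as (open, close) index pairs in a first pass over the untouched list
-- and applies all markers in a second pass; objective: alternative decomposition, same cost.
-- Both A and B mutate v_text in Python; the equivalence proved here is about the return value only.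

-- ===== PORT A =====
-- loop body of A's for-loop (state: current list, slur_is_open)
def addSlursStep (tempo : Int) (n : Int) (st : List String × Bool) (i : Int) : List String × Bool :=
  let st1 :=
    if PySem.Int.mod i tempo = 0 ∧ i < n - 1 ∧ st.2 = false then
      (PySem.List.pySetD st.1 i (PySem.List.pyGetD st.1 i "" ++ "\\("), true)
    else st
  if st1.2 = true ∧ (PySem.Int.mod i tempo = tempo - 1 ∨
      PySem.Str.startswith (PySem.List.pyGetD st1.1 (i + 1) "") "r") then
    (PySem.List.pySetD st1.1 i (PySem.List.pyGetD st1.1 i "" ++ "\\)"), false)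
  else st1

def add_slurs (v_text : List String) (tempo : Int) : List String :=
  let n : Int := v_text.length
  let res := (PySem.List.pyRange 0 (n - 1) 1).foldl (addSlursStep tempo n) (v_text, false)
  if res.2 = true then res.1 ++ ["}"] else res.1

-- ===== PORT B =====
-- B's close scan: first i in [o, n-2] where the slur must close (the inner next(...))
def altFindClose (v : List String) (tempo : Int) (n : Int) (o : Int) : Option Int :=
  (PySem.List.pyRange o (n - 1) 1).find? (fun i =>
    (PySem.Int.mod i tempo == tempo - 1) ||
      PySem.Str.startswith (PySem.List.pyGetD v (i + 1) "") "r")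

-- B's next-open scan: first i after c with i % tempo == 0 (the second next(...))
def altNextOpen (tempo : Int) (n : Int) (c : Int) : Option Int :=
  (PySem.List.pyRange (c + 1) (n - 1) 1).find? (fun i => PySem.Int.mod i tempo == 0)

-- B's while-loop collecting the (open, close) pairs; fuel only makes the recursion
-- total (the open index strictly increases each turn)
def altCollect (v : List String) (tempo : Int) (n : Int) : Int → Nat → List (Int × Option Int)
  | _, 0 => []
  | o, fuel + 1 =>
    if o < n - 1 then
      match altFindClose v tempo n o with
      | none => [(o, none)]
      | some c =>
        (o, some c) ::
          (match altNextOpen tempo n c with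
           | none => []
           | some o' => altCollect v tempo n o' fuel)
    else []

-- second pass of B: append the markers at the recorded indices
def altApply (pairs : List (Int × Option Int)) (v : List String) : List String :=
  pairs.foldl (fun v p =>
    let v1 := PySem.List.pySetD v p.1 (PySem.List.pyGetD v p.1 "" ++ "\\(")
    match p.2 with
    | some c => PySem.List.pySetD v1 c (PySem.List.pyGetD v1 c "" ++ "\\)")
    | none => v1) v

def add_slurs_alt (v_text : List String) (tempo : Int) : List String :=
  let n : Int := v_text.length
  let pairs := altCollect v_text tempo n 0 v_text.length
  let out := altApply pairs v_text
  match pairs.getLast? with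
  | some (_, none) => out ++ ["}"]
  | _ => out

-- ===== PRECONDITION & SPEC =====
-- Pre_ excludes exactly the inputs where A raises ZeroDivisionError (tempo == 0 with
-- at least two notes, so that 'i % tempo' is evaluated); A returns on everything else.
def Pre_add_slurs (v_text : List String) (tempo : Int) : Prop :=
  tempo ≠ 0 ∨ v_text.length ≤ 1
instance (v_text : List String) (tempo : Int) : Decidable (Pre_add_slurs v_text tempo) := by
  unfold Pre_add_slurs; infer_instance

def pvWitness_add_slurs : List String × Int := (["c4", "d4", "r8", "e4"], 2)

def Spec_add_slurs (v_text : List String) (tempo : Int) (out : List String) : Prop := out = add_slurs_alt v_text tempo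
instance (v_text : List String) (tempo : Int) (out : List String) : Decidable (Spec_add_slurs v_text tempo out) := by unfold Spec_add_slurs; infer_instance

-- ===== CLAIM (what is proved, stated in full; the proofs are below) =====
def Claim_equal_add_slurs : Prop := ∀ (v_text : List String) (tempo : Int), Dom_add_slurs v_text tempo → Pre_add_slurs v_text tempo → Spec_add_slurs v_text tempo (add_slurs v_text tempo)

-- ===== LEMMAS AND PROOFS =====

-- B's close predicate (the lambda inside altFindClose), named for the proofs
def predB (v : List String) (tempo : Int) (i : Int) : Bool :=
  (PySem.Int.mod i tempo == tempo - 1) ||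
    PySem.Str.startswith (PySem.List.pyGetD v (i + 1) "") "r"

theorem altFindClose_eq (v : List String) (tempo : Int) (n o : Int) :
    altFindClose v tempo n o = (PySem.List.pyRange o (n - 1) 1).find? (predB v tempo) := rfl

-- "the loop state list agrees with the original from index i on"
def Agree (v orig : List String) (i : Int) : Prop :=
  v.length = orig.length ∧ ∀ k : Nat, i ≤ (k : Int) → v[k]? = orig[k]?

theorem agree_refl (v : List String) (i : Int) : Agree v v i := ⟨rfl, fun _ _ => rfl⟩

theorem agree_mono {v orig : List String} {i j : Int} (h : Agree v orig i) (hij : i ≤ j) :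
    Agree v orig j := ⟨h.1, fun k hk => h.2 k (le_trans hij hk)⟩

theorem agree_set {v orig : List String} {i : Int} (h : Agree v orig i) (m : Int) (s : String)
    (h0 : 0 ≤ m) (hm : m < i) : Agree (PySem.List.pySetD v m s) orig i := by
  rw [PySem.List.pySetD_of_nonneg v s h0]
  refine ⟨by simp [h.1], fun k hk => ?_⟩
  rw [List.getElem?_set_ne, h.2 k hk]
  omega

theorem agree_getD {v orig : List String} {i t : Int} (h : Agree v orig i) (h0 : 0 ≤ t)
    (ht : i ≤ t) : PySem.List.pyGetD v t "" = PySem.List.pyGetD orig t "" := by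
  have h2 := h.2 t.toNat (by omega)
  rw [PySem.List.pyGetD_of_nonneg v "" h0, PySem.List.pyGetD_of_nonneg orig "" h0,
    List.getD_eq_getElem?_getD, List.getD_eq_getElem?_getD, h2]

-- the close condition of A (a Prop on the current list) is B's predB on the original
theorem pred_eq (tempo : Int) (orig v : List String) (i : Int)
    (hget : PySem.List.pyGetD v (i + 1) "" = PySem.List.pyGetD orig (i + 1) "") :
    ((PySem.Int.mod i tempo = tempo - 1 ∨
        PySem.Str.startswith (PySem.List.pyGetD v (i + 1) "") "r") ↔
      predB orig tempo i = true) := by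
  simp [predB, hget]

-- step lemmas: what A's loop body does in each situation
theorem step_skip (tempo n i : Int) (v : List String) (hmod : ¬ PySem.Int.mod i tempo = 0) :
    addSlursStep tempo n (v, false) i = (v, false) := by
  unfold addSlursStep
  split_ifs with h1 <;> first | rfl | exact absurd h1.1 hmod

theorem step_true_skip (tempo n i : Int) (v : List String)
    (hp : ¬ (PySem.Int.mod i tempo = tempo - 1 ∨
      PySem.Str.startswith (PySem.List.pyGetD v (i + 1) "") "r")) :
    addSlursStep tempo n (v, true) i = (v, true) := by
  unfold addSlursStep
  split_ifs with h1 h2 h3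
  · exact absurd h1 (by simp)
  · exact absurd h1 (by simp)
  · exact h3.2.2.elim
  · exact if_neg (fun h => hp h.2)

theorem step_true_close (tempo n i : Int) (v : List String)
    (hp : (PySem.Int.mod i tempo = tempo - 1 ∨
      PySem.Str.startswith (PySem.List.pyGetD v (i + 1) "") "r")) :
    addSlursStep tempo n (v, true) i =
      (PySem.List.pySetD v i (PySem.List.pyGetD v i "" ++ "\\)"), false) := by
  unfold addSlursStep
  split_ifs with h1 h2 h3
  · exact absurd h1 (by simp)
  · exact absurd h1 (by simp)
  · exact h3.2.2.elim
  · exact if_pos ⟨rfl, hp⟩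

theorem step_open (tempo n i : Int) (v : List String) (hmod : PySem.Int.mod i tempo = 0)
    (hi : i < n - 1)
    (hp : ¬ (PySem.Int.mod i tempo = tempo - 1 ∨
      PySem.Str.startswith
        (PySem.List.pyGetD (PySem.List.pySetD v i (PySem.List.pyGetD v i "" ++ "\\(")) (i + 1) "")
        "r")) :
    addSlursStep tempo n (v, false) i =
      (PySem.List.pySetD v i (PySem.List.pyGetD v i "" ++ "\\("), true) := by
  unfold addSlursStep
  split_ifs with h1
  · exact if_neg (fun h => hp h.2)
  · exact absurd ⟨hmod, hi, rfl⟩ h1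

theorem step_open_close (tempo n i : Int) (v : List String) (hmod : PySem.Int.mod i tempo = 0)
    (hi : i < n - 1)
    (hp : (PySem.Int.mod i tempo = tempo - 1 ∨
      PySem.Str.startswith
        (PySem.List.pyGetD (PySem.List.pySetD v i (PySem.List.pyGetD v i "" ++ "\\(")) (i + 1) "")
        "r")) :
    addSlursStep tempo n (v, false) i =
      (PySem.List.pySetD (PySem.List.pySetD v i (PySem.List.pyGetD v i "" ++ "\\("))
        i (PySem.List.pyGetD (PySem.List.pySetD v i (PySem.List.pyGetD v i "" ++ "\\(")) i ""
            ++ "\\)"), false) := by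
  unfold addSlursStep
  split_ifs with h1
  · exact if_pos ⟨rfl, hp⟩
  · exact absurd ⟨hmod, hi, rfl⟩ h1

-- '}' flag of B, as a boolean on the pair list
def unclosed (pairs : List (Int × Option Int)) : Bool :=
  match pairs.getLast? with
  | some (_, none) => true
  | _ => false

theorem unclosed_cons_some (j c : Int) (rest : List (Int × Option Int)) :
    unclosed ((j, some c) :: rest) = unclosed rest := by
  cases rest with
  | nil => simp [unclosed]
  | cons r rs => simp [unclosed, List.getLast?_cons_cons]

theorem altApply_cons (p : Int × Option Int) (rest : List (Int × Option Int)) (v : List String) :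
    altApply (p :: rest) v =
      altApply rest
        (match p.2 with
         | some c => PySem.List.pySetD (PySem.List.pySetD v p.1 (PySem.List.pyGetD v p.1 "" ++ "\\("))
             c (PySem.List.pyGetD (PySem.List.pySetD v p.1 (PySem.List.pyGetD v p.1 "" ++ "\\(")) c "" ++ "\\)")
         | none => PySem.List.pySetD v p.1 (PySem.List.pyGetD v p.1 "" ++ "\\(")) := by
  cases p with
  | mk a oc => cases oc <;> simp [altApply]

-- B's pair list as seen from an arbitrary resume point: the next open index is the
-- first multiple of tempo in [i0, n-1)
def planFrom (v : List String) (tempo n : Int) (o? : Option Int) (fuel : Nat) :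
    List (Int × Option Int) :=
  match o? with
  | none => []
  | some o => altCollect v tempo n o fuel

-- in-block scan, no close found: the state is unchanged and the slur stays open
theorem slur_block_none (orig : List String) (tempo n : Int) :
    ∀ (k : Nat) (i0 : Int) (v : List String), (n - 1 - i0).toNat = k → 0 ≤ i0 →
    Agree v orig i0 →
    (PySem.List.pyRange i0 (n - 1) 1).find? (predB orig tempo) = none →
    (PySem.List.pyRange i0 (n - 1) 1).foldl (addSlursStep tempo n) (v, true) = (v, true) := by
  intro k
  induction k using Nat.strong_induction_on with
  | _ k ih =>
    intro i0 v hk h0 hag hfind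
    by_cases hlt : i0 < n - 1
    · rw [PySem.List.pyRange_one_cons hlt] at hfind ⊢
      have hp0 : predB orig tempo i0 = false := by
        cases hx : predB orig tempo i0
        · rfl
        · rw [List.find?_cons_of_pos hx] at hfind; cases hfind
      rw [List.find?_cons_of_neg (by simp [hp0])] at hfind
      have hgd : PySem.List.pyGetD v (i0 + 1) "" = PySem.List.pyGetD orig (i0 + 1) "" :=
        agree_getD hag (by omega) (by omega)
      have hpA : ¬ (PySem.Int.mod i0 tempo = tempo - 1 ∨
          PySem.Str.startswith (PySem.List.pyGetD v (i0 + 1) "") "r") := by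
        rw [pred_eq tempo orig v i0 hgd]
        simp [hp0]
      rw [List.foldl_cons, step_true_skip tempo n i0 v hpA]
      exact ih (n - 1 - (i0 + 1)).toNat (by omega) (i0 + 1) v rfl (by omega)
        (agree_mono hag (by omega)) hfind
    · rw [PySem.List.pyRange_one_eq_nil (by omega)] at *
      simp

-- in-block scan, close found at c: A closes at c and continues from c+1
theorem slur_block_some (orig : List String) (tempo n : Int) :
    ∀ (k : Nat) (i0 : Int) (v : List String) (c : Int), (n - 1 - i0).toNat = k → 0 ≤ i0 →
    Agree v orig i0 →
    (PySem.List.pyRange i0 (n - 1) 1).find? (predB orig tempo) = some c →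
    i0 ≤ c ∧ c ≤ n - 2 ∧
      (PySem.List.pyRange i0 (n - 1) 1).foldl (addSlursStep tempo n) (v, true) =
        (PySem.List.pyRange (c + 1) (n - 1) 1).foldl (addSlursStep tempo n)
          (PySem.List.pySetD v c (PySem.List.pyGetD v c "" ++ "\\)"), false) := by
  intro k
  induction k using Nat.strong_induction_on with
  | _ k ih =>
    intro i0 v c hk h0 hag hfind
    by_cases hlt : i0 < n - 1
    · rw [PySem.List.pyRange_one_cons hlt] at hfind ⊢
      have hgd : PySem.List.pyGetD v (i0 + 1) "" = PySem.List.pyGetD orig (i0 + 1) "" :=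
        agree_getD hag (by omega) (by omega)
      cases hp0 : predB orig tempo i0 with
      | true =>
        rw [List.find?_cons_of_pos hp0] at hfind
        cases hfind
        have hpA : (PySem.Int.mod i0 tempo = tempo - 1 ∨
            PySem.Str.startswith (PySem.List.pyGetD v (i0 + 1) "") "r") := by
          rw [pred_eq tempo orig v i0 hgd]; exact hp0
        refine ⟨le_refl _, by omega, ?_⟩
        rw [List.foldl_cons, step_true_close tempo n i0 v hpA]
      | false =>
        rw [List.find?_cons_of_neg (by simp [hp0])] at hfind
        have hpA : ¬ (PySem.Int.mod i0 tempo = tempo - 1 ∨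
            PySem.Str.startswith (PySem.List.pyGetD v (i0 + 1) "") "r") := by
          rw [pred_eq tempo orig v i0 hgd]; simp [hp0]
        obtain ⟨h1, h2, h3⟩ := ih (n - 1 - (i0 + 1)).toNat (by omega) (i0 + 1) v c rfl
          (by omega) (agree_mono hag (by omega)) hfind
        refine ⟨by omega, h2, ?_⟩
        rw [List.foldl_cons, step_true_skip tempo n i0 v hpA, h3]
    · rw [PySem.List.pyRange_one_eq_nil (by omega)] at hfind
      simp at hfind

def finishA (st : List String × Bool) : List String :=
  if st.2 = true then st.1 ++ ["}"] else st.1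

-- main correspondence: A's stateful scan resumed at i0 with the slur closed equals
-- B's plan resumed at the first multiple of tempo from i0, applied to the current list
theorem slur_main (orig : List String) (tempo n : Int) :
    ∀ (k : Nat) (fuel : Nat) (i0 : Int) (v : List String), (n - 1 - i0).toNat = k →
    0 ≤ i0 → Agree v orig i0 → n - i0 ≤ (fuel : Int) →
    finishA ((PySem.List.pyRange i0 (n - 1) 1).foldl (addSlursStep tempo n) (v, false)) =
      (let P := planFrom orig tempo n
          ((PySem.List.pyRange i0 (n - 1) 1).find? (fun i => PySem.Int.mod i tempo == 0)) fuel
       altApply P v ++ (if unclosed P = true then ["}"] else [])) := by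
  intro k
  induction k using Nat.strong_induction_on with
  | _ k ih =>
    intro fuel i0 v hk h0 hag hfuel
    by_cases hlt : i0 < n - 1
    · rw [PySem.List.pyRange_one_cons hlt]
      by_cases hmod : PySem.Int.mod i0 tempo = 0
      · -- A opens a slur at i0; B's plan starts a pair at i0
        rw [List.find?_cons_of_pos (by simp [hmod])]
        cases fuel with
        | zero => exfalso; simp at hfuel; omega
        | succ f =>
          simp only [planFrom]
          rw [List.foldl_cons]
          have hag1 : Agree (PySem.List.pySetD v i0 (PySem.List.pyGetD v i0 "" ++ "\\(")) orig (i0 + 1) :=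
            agree_set (agree_mono hag (by omega)) i0 _ h0 (by omega)
          have hgd1 : PySem.List.pyGetD (PySem.List.pySetD v i0 (PySem.List.pyGetD v i0 "" ++ "\\(")) (i0 + 1) ""
              = PySem.List.pyGetD orig (i0 + 1) "" := agree_getD hag1 (by omega) (le_refl _)
          cases hp0 : predB orig tempo i0 with
          | true =>
            -- the slur closes immediately at i0
            have hpA : (PySem.Int.mod i0 tempo = tempo - 1 ∨
                PySem.Str.startswith
                  (PySem.List.pyGetD (PySem.List.pySetD v i0 (PySem.List.pyGetD v i0 "" ++ "\\(")) (i0 + 1) "") "r") := by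
              rw [pred_eq tempo orig _ i0 hgd1]; exact hp0
            rw [step_open_close tempo n i0 v hmod hlt hpA]
            have hfc : altFindClose orig tempo n i0 = some i0 := by
              rw [altFindClose_eq, PySem.List.pyRange_one_cons hlt, List.find?_cons_of_pos hp0]
            have hcol : altCollect orig tempo n i0 (f + 1) =
                (i0, some i0) ::
                  planFrom orig tempo n (altNextOpen tempo n i0) f := by
              cases h : altNextOpen tempo n i0 <;>
                simp only [altCollect, if_pos hlt, hfc, h, planFrom]
            simp only [hcol]
            have hag2 : Agree (PySem.List.pySetD (PySem.List.pySetD v i0 (PySem.List.pyGetD v i0 "" ++ "\\("))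
                i0 (PySem.List.pyGetD (PySem.List.pySetD v i0 (PySem.List.pyGetD v i0 "" ++ "\\(")) i0 "" ++ "\\)"))
                orig (i0 + 1) := agree_set hag1 i0 _ h0 (by omega)
            have hih := ih (n - 1 - (i0 + 1)).toNat (by omega) f (i0 + 1) _ rfl (by omega)
              hag2 (by push_cast at hfuel ⊢; omega)
            simp only [altNextOpen]
            simp only [altApply_cons, unclosed_cons_some]
            exact hih
          | false =>
            have hpA : ¬ (PySem.Int.mod i0 tempo = tempo - 1 ∨
                PySem.Str.startswith
                  (PySem.List.pyGetD (PySem.List.pySetD v i0 (PySem.List.pyGetD v i0 "" ++ "\\(")) (i0 + 1) "") "r") := by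
              rw [pred_eq tempo orig _ i0 hgd1]; simp [hp0]
            rw [step_open tempo n i0 v hmod hlt hpA]
            have hfc : altFindClose orig tempo n i0 =
                (PySem.List.pyRange (i0 + 1) (n - 1) 1).find? (predB orig tempo) := by
              rw [altFindClose_eq, PySem.List.pyRange_one_cons hlt, List.find?_cons_of_neg (by simp [hp0])]
            cases hrest : (PySem.List.pyRange (i0 + 1) (n - 1) 1).find? (predB orig tempo) with
            | none =>
              rw [slur_block_none orig tempo n (n - 1 - (i0 + 1)).toNat (i0 + 1) _ rfl
                (by omega) hag1 hrest]
              have hcol : altCollect orig tempo n i0 (f + 1) = [(i0, none)] := by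
                simp only [altCollect, if_pos hlt, hfc, hrest]
              simp only [hcol]
              simp [finishA, altApply, unclosed]
            | some c =>
              obtain ⟨hc1, hc2, hb⟩ := slur_block_some orig tempo n
                (n - 1 - (i0 + 1)).toNat (i0 + 1) _ c rfl (by omega) hag1 hrest
              rw [hb]
              have hcol : altCollect orig tempo n i0 (f + 1) =
                  (i0, some c) :: planFrom orig tempo n (altNextOpen tempo n c) f := by
                cases h : altNextOpen tempo n c <;>
                  simp only [altCollect, if_pos hlt, hfc, hrest, h, planFrom]
              simp only [hcol]
              have hag2 : Agree (PySem.List.pySetD (PySem.List.pySetD v i0 (PySem.List.pyGetD v i0 "" ++ "\\("))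
                  c (PySem.List.pyGetD (PySem.List.pySetD v i0 (PySem.List.pyGetD v i0 "" ++ "\\(")) c "" ++ "\\)"))
                  orig (c + 1) := agree_set (agree_mono hag1 (by omega)) c _ (by omega) (by omega)
              have hih := ih (n - 1 - (c + 1)).toNat (by omega) f (c + 1) _ rfl (by omega)
                hag2 (by push_cast at hfuel ⊢; omega)
              simp only [altNextOpen]
              simp only [altApply_cons, unclosed_cons_some]
              exact hih
      · -- A skips a non-multiple index; B's plan is unchanged
        rw [List.find?_cons_of_neg (by simp [hmod]), List.foldl_cons,
          step_skip tempo n i0 v hmod]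
        exact ih (n - 1 - (i0 + 1)).toNat (by omega) fuel (i0 + 1) v rfl (by omega)
          (agree_mono hag (by omega)) (by omega)
    · -- loop range empty: nothing to do on either side
      rw [PySem.List.pyRange_one_eq_nil (by omega)]
      simp [finishA, planFrom, altApply, unclosed]

-- ===== VERDICT (by name: the statement is the Claim_ definition above) =====
theorem add_slurs_spec : Claim_equal_add_slurs := by
  intro v tempo hdom hpre
  unfold Spec_add_slurs
  have hA : add_slurs v tempo =
      finishA ((PySem.List.pyRange 0 ((v.length : Int) - 1) 1).foldl
        (addSlursStep tempo (v.length : Int)) (v, false)) := rfl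
  have hB : add_slurs_alt v tempo =
      altApply (altCollect v tempo (v.length : Int) 0 v.length) v ++
        (if unclosed (altCollect v tempo (v.length : Int) 0 v.length) = true
         then ["}"] else []) := by
    unfold add_slurs_alt unclosed
    cases hl : (altCollect v tempo (v.length : Int) 0 v.length).getLast? with
    | none => simp [hl]
    | some p =>
      cases p with
      | mk a oc => cases oc <;> simp [hl]
  rw [hA, hB]
  by_cases hn : (v.length : Int) ≤ 1
  · -- at most one element: both loops are empty
    rw [PySem.List.pyRange_one_eq_nil (by omega)]
    have hcol : altCollect v tempo (v.length : Int) 0 v.length = [] := by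
      cases hf : v.length with
      | zero => simp [altCollect]
      | succ m =>
        simp only [altCollect]
        rw [if_neg (by push_cast at hn ⊢; omega)]
    rw [hcol]
    simp [finishA, altApply, unclosed]
  · have htempo : tempo ≠ 0 := by
      rcases hpre with h | h
      · exact h
      · exfalso; push_cast at hn; omega
    have hmod0 : PySem.Int.mod 0 tempo = 0 :=
      (PySem.Int.mod_eq_zero_iff_dvd 0 tempo).mpr (dvd_zero tempo)
    have hfirst : (PySem.List.pyRange 0 ((v.length : Int) - 1) 1).find?
        (fun i => PySem.Int.mod i tempo == 0) = some 0 := by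
      rw [PySem.List.pyRange_one_cons (by omega), List.find?_cons_of_pos (by simp [hmod0])]
    have h := slur_main v tempo (v.length : Int) ((v.length : Int) - 1 - 0).toNat v.length 0 v
      rfl (le_refl 0) (agree_refl v 0) (by omega)
    simp only [hfirst, planFrom] at h
    exact h
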